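-- pv_equiv track=rewrite | github.com/mik11231/python | advent2016/Day13/day13_part2.py | solve
-- ===== SOURCE A (Python) =====
-- from collections import deque
--
-- def wall(x: int, y: int, fav: int) -> bool:
--     """Return True when (x,y) is a wall."""
--     v = x * x + 3 * x + 2 * x * y + y + y * y + fav
--     return bin(v).count("1") % 2 == 1
--
-- def solve(s: str) -> int:
--     """Count positions reachable from (1,1) in at most 50 steps."""
--     fav = int(s.strip())
--     q = deque([(1, 1, 0)])
--     seen = {(1, 1)}
--     while q:
--         x, y, d = q.popleft()
--         if d == 50:
--             continue
--         for nx, ny in ((x + 1, y), (x - 1, y), (x, y + 1), (x, y - 1)):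
--             if nx < 0 or ny < 0:
--                 continue
--             if wall(nx, ny, fav):
--                 continue
--             if (nx, ny) not in seen:
--                 seen.add((nx, ny))
--                 q.append((nx, ny, d + 1))
--     return len(seen)
-- ===== SOURCE B (Python) =====
-- def wall(x, y, fav):
--     """Return True when (x,y) is a wall."""
--     v = x * x + 3 * x + 2 * x * y + y + y * y + fav
--     return bin(v).count("1") % 2 == 1
--
-- def solve(s):
--     """Count positions reachable from (1,1) in at most 50 steps, by 50 rounds of a
--     whole-grid pull-based reachability sweep over [0,51]^2 (no queue, no frontier):
--     a cell joins the set when it is already in it, or is open and touches the set."""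
--     fav = int(s.strip())
--     reach = {(1, 1)}
--     for _ in range(50):
--         reach = {
--             (x, y)
--             for x in range(52)
--             for y in range(52)
--             if (x, y) in reach
--             or (not wall(x, y, fav)
--                 and ((x + 1, y) in reach or (x - 1, y) in reach
--                      or (x, y + 1) in reach or (x, y - 1) in reach))
--         }
--     return len(reach)
-- ===== Notes on version B (the rewrite author's own statement) =====
-- stated objective: alternative
-- what changed: Replaces the depth-tagged deque BFS (pop a cell, push its unseen open neighbours, mutate one visited set) with a queue-free pull-based reachability sweep: 50 rounds, each rebuilding the whole reach set by one comprehension over the fixed 52x52 grid, keeping a cell iff it is already reached or is open and touches a reached cell.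
import Mathlib
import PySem

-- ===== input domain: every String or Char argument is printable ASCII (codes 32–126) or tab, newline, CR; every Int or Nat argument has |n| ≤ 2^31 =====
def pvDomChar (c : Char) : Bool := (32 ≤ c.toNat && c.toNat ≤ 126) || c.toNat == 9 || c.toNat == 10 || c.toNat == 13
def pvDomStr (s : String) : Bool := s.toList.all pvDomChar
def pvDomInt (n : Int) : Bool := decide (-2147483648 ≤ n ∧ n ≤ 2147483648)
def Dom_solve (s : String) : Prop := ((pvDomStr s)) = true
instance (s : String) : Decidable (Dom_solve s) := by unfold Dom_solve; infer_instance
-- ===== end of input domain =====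

-- B replaces A's queue-driven flood fill by 50 rounds of a pull-based whole-grid reachability
-- sweep over [0,51]^2 (no queue, no frontier, no mutation during a round); objective: alternative.

-- ===== PORT A =====
-- shared leaf helper of both Python modules: bin(v).count("1") counts the 1-bits of |v|,
-- which is exactly PySem.Int.bitCount.
def wall (x y fav : Int) : Bool :=
  PySem.Int.bitCount (x * x + 3 * x + 2 * x * y + y + y * y + fav) % 2 == 1

-- body of A's inner `for nx, ny in (...)` loop: three `continue` guards, else push + mark seen
def solvePush (fav d : Int) (st : List (Int × Int × Int) × PySem.Set (Int × Int))
    (n : Int × Int) : List (Int × Int × Int) × PySem.Set (Int × Int) :=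
  if n.1 < 0 ∨ n.2 < 0 then st
  else if wall n.1 n.2 fav then st
  else if n ∈ st.2 then st
  else (st.1 ++ [(n.1, n.2, d + 1)], PySem.Set.add st.2 n)

-- A's `while q:` loop; fuel only makes the recursion structural (2705 is proved sufficient below)
def solveLoop (fav : Int) : Nat → List (Int × Int × Int) → PySem.Set (Int × Int) → Int
  | 0, _, seen => (seen.length : Int)
  | _ + 1, [], seen => (seen.length : Int)
  | fuel + 1, (x, y, d) :: q, seen =>
    if d == 50 then solveLoop fav fuel q seen
    else
      let st := [(x + 1, y), (x - 1, y), (x, y + 1), (x, y - 1)].foldl (solvePush fav d) (q, seen)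
      solveLoop fav fuel st.1 st.2

def solve (s : String) : Int :=
  match PySem.Int.ofStr? (PySem.Str.strip s) with
  | none => 0
  | some fav => solveLoop fav 2705 [(1, 1, 0)] (PySem.Set.ofList [(1, 1)])

-- ===== PORT B =====
-- the comprehension's index set: (x, y) for x in range(52) for y in range(52)
def grid52 : List (Int × Int) :=
  (PySem.List.pyRange 0 52 1).flatMap (fun x => (PySem.List.pyRange 0 52 1).map (fun y => (x, y)))

-- one sweep: the set comprehension rebuilding `reach` (a cell is kept when it is already
-- reached, or is open and one of its four neighbours is reached)
def reachRound (fav : Int) (R : PySem.Set (Int × Int)) : PySem.Set (Int × Int) :=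
  grid52.filter (fun p =>
    R.contains p ||
      (!(wall p.1 p.2 fav) &&
        (R.contains (p.1 + 1, p.2) || R.contains (p.1 - 1, p.2) ||
         R.contains (p.1, p.2 + 1) || R.contains (p.1, p.2 - 1))))

def solve_alt (s : String) : Int :=
  match PySem.Int.ofStr? (PySem.Str.strip s) with
  | none => 0
  | some fav =>
    (((List.range 50).foldl (fun R _ => reachRound fav R)
        (PySem.Set.ofList [(1, 1)])).length : Int)

-- ===== PRECONDITION & SPEC =====
-- Pre_solve: int(s.strip()) parses (otherwise the Python raises ValueError)
def Pre_solve (s : String) : Prop := (PySem.Int.ofStr? (PySem.Str.strip s)).isSome = true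
instance (s : String) : Decidable (Pre_solve s) := by unfold Pre_solve; infer_instance
def pvWitness_solve : String := "7"

def Spec_solve (s : String) (out : Int) : Prop := out = solve_alt s
instance (s : String) (out : Int) : Decidable (Spec_solve s out) := by unfold Spec_solve; infer_instance

-- ===== CLAIM (what is proved, stated in full; the proofs are below) =====
def Claim_equal_solve : Prop := ∀ (s : String), Dom_solve s → Pre_solve s → Spec_solve s (solve s)

-- ===== LEMMAS AND PROOFS =====

-- ---- proof-side model of A: level-synchronous expansion of the deque BFS ----

-- one neighbour-push of the level model, same test as A's three guards combined
def solveAltPush (fav : Int) (st : PySem.Set (Int × Int) × List (Int × Int))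
    (n : Int × Int) : PySem.Set (Int × Int) × List (Int × Int) :=
  if 0 ≤ n.1 ∧ 0 ≤ n.2 ∧ wall n.1 n.2 fav = false ∧ n ∉ st.1 then
    (PySem.Set.add st.1 n, st.2 ++ [n])
  else st

-- expand one frontier cell into the running (seen, next-frontier) state
def solveAltExpand (fav : Int) (st : PySem.Set (Int × Int) × List (Int × Int))
    (p : Int × Int) : PySem.Set (Int × Int) × List (Int × Int) :=
  [(p.1 + 1, p.2), (p.1 - 1, p.2), (p.1, p.2 + 1), (p.1, p.2 - 1)].foldl (solveAltPush fav) st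

-- one level: expand the whole frontier, starting from an empty next frontier
def solveAltRound (fav : Int) (st : PySem.Set (Int × Int) × List (Int × Int)) :
    PySem.Set (Int × Int) × List (Int × Int) :=
  st.2.foldl (solveAltExpand fav) (st.1, [])

-- attach depth d to a frontier cell (A's queue entries)
def tag (d : Int) (p : Int × Int) : Int × Int × Int := (p.1, p.2, d)

-- q is one of p's four orthogonal neighbours
def adj (p q : Int × Int) : Prop :=
  q = (p.1 + 1, p.2) ∨ q = (p.1 - 1, p.2) ∨ q = (p.1, p.2 + 1) ∨ q = (p.1, p.2 - 1)

-- a cell A would accept: nonnegative coordinates, not a wall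
def good (fav : Int) (p : Int × Int) : Prop :=
  0 ≤ p.1 ∧ 0 ≤ p.2 ∧ wall p.1 p.2 fav = false

-- coordinates within [0, c]
def Bnd (c : Int) (p : Int × Int) : Prop := 0 ≤ p.1 ∧ 0 ≤ p.2 ∧ p.1 ≤ c ∧ p.2 ≤ c

theorem adj_symm {p q : Int × Int} (h : adj p q) : adj q p := by
  obtain ⟨a, b⟩ := p
  rcases h with h | h | h | h <;> subst h <;> unfold adj <;> simp

-- the two defining equations of solveLoop, for rewriting
theorem solveLoop_cons (fav x y d : Int) (fuel : Nat) (q : List (Int × Int × Int))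
    (seen : PySem.Set (Int × Int)) :
    solveLoop fav (fuel + 1) ((x, y, d) :: q) seen
      = if d == 50 then solveLoop fav fuel q seen
        else
          let st := [(x + 1, y), (x - 1, y), (x, y + 1), (x, y - 1)].foldl
            (solvePush fav d) (q, seen)
          solveLoop fav fuel st.1 st.2 := rfl

-- the level model's push folds append to the next-frontier accumulator
theorem pushfold_shift (fav : Int) (ns : List (Int × Int)) :
    ∀ (seen : PySem.Set (Int × Int)) (nf : List (Int × Int)),
    ns.foldl (solveAltPush fav) (seen, nf)
      = ((ns.foldl (solveAltPush fav) (seen, [])).1,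
         nf ++ (ns.foldl (solveAltPush fav) (seen, [])).2) := by
  induction ns with
  | nil => intro seen nf; simp
  | cons n ns ih =>
    intro seen nf
    simp only [List.foldl_cons]
    by_cases hc : 0 ≤ n.1 ∧ 0 ≤ n.2 ∧ wall n.1 n.2 fav = false ∧ n ∉ seen
    · rw [show solveAltPush fav (seen, nf) n = (PySem.Set.add seen n, nf ++ [n]) from by
          simp [solveAltPush, hc],
        show solveAltPush fav (seen, []) n = (PySem.Set.add seen n, [n]) from by
          simp [solveAltPush, hc],
        ih (PySem.Set.add seen n) (nf ++ [n]), ih (PySem.Set.add seen n) [n]]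
      simp
    · rw [show solveAltPush fav (seen, nf) n = (seen, nf) from by simp [solveAltPush, hc],
        show solveAltPush fav (seen, []) n = (seen, []) from by simp [solveAltPush, hc]]
      exact ih seen nf

-- A's push fold = queue ++ tagged new cells of the level model's push fold, same seen
theorem pushfold_corr (fav d : Int) (ns : List (Int × Int)) :
    ∀ (q : List (Int × Int × Int)) (seen : PySem.Set (Int × Int)),
    ns.foldl (solvePush fav d) (q, seen)
      = (q ++ ((ns.foldl (solveAltPush fav) (seen, [])).2).map (tag (d + 1)),
         (ns.foldl (solveAltPush fav) (seen, [])).1) := by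
  induction ns with
  | nil => intro q seen; simp
  | cons n ns ih =>
    intro q seen
    simp only [List.foldl_cons]
    by_cases h1 : n.1 < 0 ∨ n.2 < 0
    · rw [show solvePush fav d (q, seen) n = (q, seen) from by simp [solvePush, h1],
        show solveAltPush fav (seen, []) n = (seen, []) from by
          have : ¬(0 ≤ n.1 ∧ 0 ≤ n.2 ∧ wall n.1 n.2 fav = false ∧ n ∉ seen) := by
            rintro ⟨ha, hb, -, -⟩; omega
          simp [solveAltPush, this]]
      exact ih q seen
    · by_cases h2 : wall n.1 n.2 fav = true
      · rw [show solvePush fav d (q, seen) n = (q, seen) from by simp [solvePush, h1, h2],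
          show solveAltPush fav (seen, []) n = (seen, []) from by
            have : ¬(0 ≤ n.1 ∧ 0 ≤ n.2 ∧ wall n.1 n.2 fav = false ∧ n ∉ seen) := by
              rintro ⟨-, -, hw, -⟩; simp [h2] at hw
            simp [solveAltPush, this]]
        exact ih q seen
      · by_cases h3 : n ∈ seen
        · rw [show solvePush fav d (q, seen) n = (q, seen) from by simp [solvePush, h1, h2, h3],
            show solveAltPush fav (seen, []) n = (seen, []) from by
              have : ¬(0 ≤ n.1 ∧ 0 ≤ n.2 ∧ wall n.1 n.2 fav = false ∧ n ∉ seen) := by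
                rintro ⟨-, -, -, hm⟩; exact hm h3
              simp [solveAltPush, this]]
          exact ih q seen
        · have hc : 0 ≤ n.1 ∧ 0 ≤ n.2 ∧ wall n.1 n.2 fav = false ∧ n ∉ seen := by
            push Not at h1
            exact ⟨h1.1, h1.2, by simpa using h2, h3⟩
          rw [show solvePush fav d (q, seen) n
                = (q ++ [(n.1, n.2, d + 1)], PySem.Set.add seen n) from by
              simp [solvePush, h1, h2, h3],
            show solveAltPush fav (seen, []) n = (PySem.Set.add seen n, [n]) from by
              simp [solveAltPush, hc],
            ih (q ++ [(n.1, n.2, d + 1)]) (PySem.Set.add seen n),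
            pushfold_shift fav ns (PySem.Set.add seen n) [n]]
          simp [tag]

-- accounting + membership facts of the level model's push fold
theorem pushfold_props (fav : Int) (ns : List (Int × Int)) :
    ∀ (st : PySem.Set (Int × Int) × List (Int × Int)),
    ((ns.foldl (solveAltPush fav) st).1.length + st.2.length
        = st.1.length + (ns.foldl (solveAltPush fav) st).2.length)
    ∧ (st.1.Nodup → (ns.foldl (solveAltPush fav) st).1.Nodup)
    ∧ (∀ q ∈ (ns.foldl (solveAltPush fav) st).2, q ∈ st.2 ∨ (q ∈ ns ∧ good fav q))
    ∧ (∀ q ∈ (ns.foldl (solveAltPush fav) st).1, q ∈ st.1 ∨ (q ∈ ns ∧ good fav q)) := by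
  induction ns with
  | nil => intro st; simp
  | cons n ns ih =>
    intro st
    simp only [List.foldl_cons]
    by_cases hc : 0 ≤ n.1 ∧ 0 ≤ n.2 ∧ wall n.1 n.2 fav = false ∧ n ∉ st.1
    · rw [show solveAltPush fav st n = (PySem.Set.add st.1 n, st.2 ++ [n]) from by
          simp [solveAltPush, hc]]
      obtain ⟨ihl, ihnd, ih2, ih1⟩ := ih (PySem.Set.add st.1 n, st.2 ++ [n])
      have hadd : PySem.Set.add st.1 n = st.1 ++ [n] := PySem.Set.add_of_not_mem hc.2.2.2
      have hgood : good fav n := ⟨hc.1, hc.2.1, hc.2.2.1⟩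
      refine ⟨?_, ?_, ?_, ?_⟩
      · simp only [hadd, List.length_append, List.length_cons, List.length_nil] at ihl ⊢
        omega
      · intro hnd
        have hnd' : (PySem.Set.add st.1 n).Nodup := by
          rw [hadd]
          refine List.Nodup.append hnd (by simp) ?_
          simpa using hc.2.2.2
        exact ihnd hnd'
      · intro q hq
        rcases ih2 q hq with hq' | hq'
        · rcases List.mem_append.mp hq' with h | h
          · exact Or.inl h
          · simp only [List.mem_singleton] at h
            subst h
            exact Or.inr ⟨by simp, hgood⟩
        · exact Or.inr ⟨by simp [hq'.1], hq'.2⟩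
      · intro q hq
        rcases ih1 q hq with hq' | hq'
        · rw [hadd] at hq'
          rcases List.mem_append.mp hq' with h | h
          · exact Or.inl h
          · simp only [List.mem_singleton] at h
            subst h
            exact Or.inr ⟨by simp, hgood⟩
        · exact Or.inr ⟨by simp [hq'.1], hq'.2⟩
    · rw [show solveAltPush fav st n = st from by simp [solveAltPush, hc]]
      obtain ⟨ihl, ihnd, ih2, ih1⟩ := ih st
      refine ⟨ihl, ihnd, ?_, ?_⟩
      · intro q hq
        rcases ih2 q hq with h | h
        · exact Or.inl h
        · exact Or.inr ⟨by simp [h.1], h.2⟩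
      · intro q hq
        rcases ih1 q hq with h | h
        · exact Or.inl h
        · exact Or.inr ⟨by simp [h.1], h.2⟩

-- accounting + membership facts of a whole level
theorem levelfold_props (fav : Int) (F : List (Int × Int)) :
    ∀ (st : PySem.Set (Int × Int) × List (Int × Int)),
    ((F.foldl (solveAltExpand fav) st).1.length + st.2.length
        = st.1.length + (F.foldl (solveAltExpand fav) st).2.length)
    ∧ (st.1.Nodup → (F.foldl (solveAltExpand fav) st).1.Nodup)
    ∧ (∀ q ∈ (F.foldl (solveAltExpand fav) st).2, q ∈ st.2 ∨ ∃ p ∈ F, adj p q ∧ good fav q)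
    ∧ (∀ q ∈ (F.foldl (solveAltExpand fav) st).1, q ∈ st.1 ∨ ∃ p ∈ F, adj p q ∧ good fav q) := by
  induction F with
  | nil => intro st; simp
  | cons p F ih =>
    intro st
    simp only [List.foldl_cons]
    obtain ⟨pl, pnd, p2, p1⟩ := pushfold_props fav
      [(p.1 + 1, p.2), (p.1 - 1, p.2), (p.1, p.2 + 1), (p.1, p.2 - 1)] st
    obtain ⟨ihl, ihnd, ih2, ih1⟩ := ih (solveAltExpand fav st p)
    have hnbr : ∀ q : Int × Int,
        q ∈ ([(p.1 + 1, p.2), (p.1 - 1, p.2), (p.1, p.2 + 1), (p.1, p.2 - 1)] : List (Int × Int))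
          ∧ good fav q → adj p q ∧ good fav q := by
      intro q ⟨hm, hg⟩
      simp only [List.mem_cons, List.not_mem_nil, or_false] at hm
      exact ⟨hm, hg⟩
    refine ⟨?_, ?_, ?_, ?_⟩
    · have : (solveAltExpand fav st p).1.length + st.2.length
          = st.1.length + (solveAltExpand fav st p).2.length := pl
      omega
    · intro hnd; exact ihnd (pnd hnd)
    · intro q hq
      rcases ih2 q hq with h | ⟨p', hp', hn⟩
      · rcases p2 q h with h' | h'
        · exact Or.inl h'
        · exact Or.inr ⟨p, by simp, hnbr q h'⟩
      · exact Or.inr ⟨p', by simp [hp'], hn⟩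
    · intro q hq
      rcases ih1 q hq with h | ⟨p', hp', hn⟩
      · rcases p1 q h with h' | h'
        · exact Or.inl h'
        · exact Or.inr ⟨p, by simp, hnbr q h'⟩
      · exact Or.inr ⟨p', by simp [hp'], hn⟩

-- A consumes one whole level of its queue exactly as the level model's fold
theorem level_corr (fav d : Int) (hd : d ≠ 50) (F : List (Int × Int)) :
    ∀ (G : List (Int × Int)) (seen : PySem.Set (Int × Int)) (fuel : Nat),
    solveLoop fav (fuel + F.length) (F.map (tag d) ++ G.map (tag (d + 1))) seen
      = solveLoop fav fuel
          ((F.foldl (solveAltExpand fav) (seen, G)).2.map (tag (d + 1)))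
          (F.foldl (solveAltExpand fav) (seen, G)).1 := by
  induction F with
  | nil => intro G seen fuel; simp
  | cons p F ih =>
    intro G seen fuel
    have hfuel : fuel + (p :: F).length = (fuel + F.length) + 1 := by
      simp [List.length_cons]; omega
    rw [hfuel]
    have hcons : (p :: F).map (tag d) ++ G.map (tag (d + 1))
        = (p.1, p.2, d) :: (F.map (tag d) ++ G.map (tag (d + 1))) := by simp [tag]
    rw [hcons, solveLoop_cons, if_neg (by simpa using hd)]
    rw [pushfold_corr fav d _ (F.map (tag d) ++ G.map (tag (d + 1))) seen]
    simp only []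
    rw [List.append_assoc, ← List.map_append]
    rw [ih (G ++ ([(p.1 + 1, p.2), (p.1 - 1, p.2), (p.1, p.2 + 1), (p.1, p.2 - 1)].foldl
        (solveAltPush fav) (seen, [])).2)
      ([(p.1 + 1, p.2), (p.1 - 1, p.2), (p.1, p.2 + 1), (p.1, p.2 - 1)].foldl
        (solveAltPush fav) (seen, [])).1 fuel]
    have hstep : (p :: F).foldl (solveAltExpand fav) (seen, G)
        = F.foldl (solveAltExpand fav)
            (([(p.1 + 1, p.2), (p.1 - 1, p.2), (p.1, p.2 + 1), (p.1, p.2 - 1)].foldl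
                (solveAltPush fav) (seen, [])).1,
             G ++ ([(p.1 + 1, p.2), (p.1 - 1, p.2), (p.1, p.2 + 1), (p.1, p.2 - 1)].foldl
                (solveAltPush fav) (seen, [])).2) := by
      rw [List.foldl_cons]
      congr 1
      unfold solveAltExpand
      exact pushfold_shift fav _ seen G
    rw [hstep]

-- entries at depth 50 are popped and discarded one by one
theorem drain (fav : Int) (F : List (Int × Int)) :
    ∀ (seen : PySem.Set (Int × Int)) (fuel : Nat),
    solveLoop fav (fuel + F.length + 1) (F.map (tag 50)) seen = (seen.length : Int) := by
  induction F with
  | nil => intro seen fuel; simp [solveLoop]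
  | cons p F ih =>
    intro seen fuel
    have hfuel : fuel + (p :: F).length + 1 = (fuel + F.length + 1) + 1 := by
      simp [List.length_cons]; omega
    have hcons : (p :: F).map (tag 50) = (p.1, p.2, (50 : Int)) :: F.map (tag 50) := by
      simp [tag]
    rw [hfuel, hcons, solveLoop_cons, if_pos (by simp)]
    exact ih seen fuel

-- a neighbour (with nonnegative coordinates) of a cell bounded by c is bounded by c + 1
theorem nbr_bnd {c : Int} {p q : Int × Int} (hb : Bnd c p) (ha : adj p q)
    (h1 : 0 ≤ q.1) (h2 : 0 ≤ q.2) : Bnd (c + 1) q := by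
  unfold Bnd at hb ⊢
  obtain ⟨hb1, hb2, hb3, hb4⟩ := hb
  rcases ha with h | h | h | h <;> subst h <;> refine ⟨h1, h2, ?_, ?_⟩ <;> simp at * <;> omega

-- Bnd is monotone in the bound
theorem bnd_mono {c c' : Int} {p : Int × Int} (h : c ≤ c') (hb : Bnd c p) : Bnd c' p := by
  unfold Bnd at hb ⊢
  omega

-- a nodup list of cells inside [0,51]² has at most 52² = 2704 elements
set_option maxRecDepth 4096 in
theorem card_le_2704 (l : List (Int × Int)) (hnd : l.Nodup) (hb : ∀ p ∈ l, Bnd 51 p) :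
    l.length ≤ 2704 := by
  classical
  have hsub : l.toFinset ⊆ Finset.Icc (0 : ℤ) 51 ×ˢ Finset.Icc (0 : ℤ) 51 := by
    intro p hp
    have hp' : p ∈ l := List.mem_toFinset.mp hp
    have h := hb p hp'
    unfold Bnd at h
    obtain ⟨h1, h2, h3, h4⟩ := h
    simp only [Finset.mem_product, Finset.mem_Icc]
    exact ⟨⟨h1, h3⟩, ⟨h2, h4⟩⟩
  calc l.length = l.toFinset.card := (List.toFinset_card_of_nodup hnd).symm
    _ ≤ (Finset.Icc (0 : ℤ) 51 ×ˢ Finset.Icc (0 : ℤ) 51).card := Finset.card_le_card hsub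
    _ = 2704 := by rw [Finset.card_product]; simp [Int.card_Icc]

-- a constant-body foldl over a list is iterated application
theorem foldl_const_iterate {α β : Type} (f : α → α) :
    ∀ (l : List β) (st : α), l.foldl (fun st _ => f st) st = f^[l.length] st := by
  intro l
  induction l with
  | nil => intro st; simp
  | cons b l ih =>
    intro st
    rw [List.foldl_cons, ih (f st), List.length_cons, ← Function.iterate_succ_apply]

-- main induction for the A side: with k rounds to go, A's loop from a depth-(50-k) frontier
-- equals k iterations of the level model's round
theorem rounds (fav : Int) :
    ∀ (k : Nat), k ≤ 50 →
    ∀ (F : List (Int × Int)) (seen : PySem.Set (Int × Int)) (extra : Nat),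
    seen.Nodup →
    (∀ p ∈ seen, Bnd 51 p) →
    (∀ p ∈ F, Bnd (51 - (k : Int)) p) →
    solveLoop fav (F.length + ((2704 - seen.length) + 1 + extra))
        (F.map (tag ((50 : Int) - (k : Nat)))) seen
      = (((solveAltRound fav)^[k] (seen, F)).1.length : Int) := by
  intro k
  induction k with
  | zero =>
    intro _ F seen extra hnd hseen hF
    have h50 : ((50 : Int) - ((0 : Nat) : Int)) = 50 := by norm_num
    rw [h50]
    have hfuel : F.length + ((2704 - seen.length) + 1 + extra)
        = ((2704 - seen.length) + extra) + F.length + 1 := by omega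
    rw [hfuel, drain]
    simp
  | succ k ih =>
    intro hk F seen extra hnd hseen hF
    have hk' : k ≤ 50 := by omega
    have hd : ((50 : Int) - ((k + 1 : Nat) : Int)) ≠ 50 := by push_cast; omega
    have hnil : F.map (tag ((50 : Int) - ((k + 1 : Nat) : Int)))
        = F.map (tag ((50 : Int) - ((k + 1 : Nat) : Int))) ++
          ([] : List (Int × Int)).map (tag (((50 : Int) - ((k + 1 : Nat) : Int)) + 1)) := by
      simp
    have hfuel : F.length + ((2704 - seen.length) + 1 + extra)
        = ((2704 - seen.length) + 1 + extra) + F.length := by omega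
    rw [hfuel, hnil, level_corr fav _ hd F [] seen ((2704 - seen.length) + 1 + extra)]
    obtain ⟨hlen, hndf, hm2, hm1⟩ := levelfold_props fav F (seen, [])
    set r := F.foldl (solveAltExpand fav) (seen, ([] : List (Int × Int))) with hr
    have hlen' : r.1.length = seen.length + r.2.length := by simpa using hlen
    have hnd1 : r.1.Nodup := hndf hnd
    have hseen1 : ∀ p ∈ r.1, Bnd 51 p := by
      intro p hp
      rcases hm1 p hp with h | ⟨p', hp', hn⟩
      · exact hseen p h
      · exact bnd_mono (by push_cast; omega) (nbr_bnd (hF p' hp') hn.1 hn.2.1 hn.2.2.1)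
    have hF1 : ∀ p ∈ r.2, Bnd (51 - (k : Int)) p := by
      intro p hp
      rcases hm2 p hp with h | ⟨p', hp', hn⟩
      · simp at h
      · exact bnd_mono (by push_cast; omega) (nbr_bnd (hF p' hp') hn.1 hn.2.1 hn.2.2.1)
    have hcard := card_le_2704 r.1 hnd1 hseen1
    have hR : (2704 - seen.length) + 1 + extra
        = r.2.length + ((2704 - r.1.length) + 1 + extra) := by omega
    have htag : ((50 : Int) - ((k + 1 : Nat) : Int)) + 1 = (50 : Int) - ((k : Nat) : Int) := by
      push_cast; ring
    rw [hR, htag, ih hk' r.2 r.1 extra hnd1 hseen1 hF1]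
    rw [Function.iterate_succ_apply, Prod.mk.eta,
      show solveAltRound fav (seen, F) = r from hr ▸ rfl]

-- ---- bridging the level model to B's pull sweep ----

-- the push fold only grows seen
theorem pushfold_mono (fav : Int) (ns : List (Int × Int)) :
    ∀ (st : PySem.Set (Int × Int) × List (Int × Int)) (q : Int × Int),
    q ∈ st.1 → q ∈ (ns.foldl (solveAltPush fav) st).1 := by
  induction ns with
  | nil => intro st q hq; simpa using hq
  | cons n ns ih =>
    intro st q hq
    simp only [List.foldl_cons]
    refine ih _ q ?_
    by_cases hc : 0 ≤ n.1 ∧ 0 ≤ n.2 ∧ wall n.1 n.2 fav = false ∧ n ∉ st.1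
    · rw [show solveAltPush fav st n = (PySem.Set.add st.1 n, st.2 ++ [n]) from by
          simp [solveAltPush, hc]]
      exact (PySem.Set.mem_add _ _ _).mpr (Or.inl hq)
    · rw [show solveAltPush fav st n = st from by simp [solveAltPush, hc]]
      exact hq

-- a good member of the neighbour list ends up in seen
theorem pushfold_complete (fav : Int) (ns : List (Int × Int)) :
    ∀ (st : PySem.Set (Int × Int) × List (Int × Int)) (n : Int × Int),
    n ∈ ns → good fav n → n ∈ (ns.foldl (solveAltPush fav) st).1 := by
  induction ns with
  | nil => intro st n hn; simp at hn
  | cons m ns ih =>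
    intro st n hn hg
    simp only [List.foldl_cons]
    rcases List.mem_cons.mp hn with rfl | hn'
    · by_cases hc : 0 ≤ n.1 ∧ 0 ≤ n.2 ∧ wall n.1 n.2 fav = false ∧ n ∉ st.1
      · rw [show solveAltPush fav st n = (PySem.Set.add st.1 n, st.2 ++ [n]) from by
            simp [solveAltPush, hc]]
        exact pushfold_mono fav ns _ n ((PySem.Set.mem_add _ _ _).mpr (Or.inr rfl))
      · have hmem : n ∈ st.1 := by
          by_contra hnm
          exact hc ⟨hg.1, hg.2.1, hg.2.2, hnm⟩
        rw [show solveAltPush fav st n = st from by simp [solveAltPush, hc]]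
        exact pushfold_mono fav ns st n hmem
    · exact ih _ n hn' hg

-- the level fold only grows seen
theorem expandfold_mono (fav : Int) (F : List (Int × Int)) :
    ∀ (st : PySem.Set (Int × Int) × List (Int × Int)) (q : Int × Int),
    q ∈ st.1 → q ∈ (F.foldl (solveAltExpand fav) st).1 := by
  induction F with
  | nil => intro st q hq; simpa using hq
  | cons p F ih =>
    intro st q hq
    simp only [List.foldl_cons]
    exact ih _ q (pushfold_mono fav _ st q hq)

-- every good neighbour of a frontier cell ends up in seen
theorem expand_complete (fav : Int) (F : List (Int × Int))
    (st : PySem.Set (Int × Int) × List (Int × Int)) (q p : Int × Int)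
    (hq : q ∈ F) (ha : adj q p) (hg : good fav p) :
    p ∈ (F.foldl (solveAltExpand fav) st).1 := by
  obtain ⟨l1, l2, rfl⟩ := List.append_of_mem hq
  rw [List.foldl_append, List.foldl_cons]
  refine expandfold_mono fav l2 _ p ?_
  unfold solveAltExpand
  refine pushfold_complete fav _ _ p ?_ hg
  rcases ha with h | h | h | h <;> subst h <;> simp

-- with an empty initial next frontier, final seen = initial seen ++ next frontier
theorem pushfold_seen_append (fav : Int) (ns : List (Int × Int)) :
    ∀ (seen : PySem.Set (Int × Int)),
    (ns.foldl (solveAltPush fav) (seen, [])).1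
      = seen ++ (ns.foldl (solveAltPush fav) (seen, [])).2 := by
  induction ns with
  | nil => intro seen; simp
  | cons n ns ih =>
    intro seen
    simp only [List.foldl_cons]
    by_cases hc : 0 ≤ n.1 ∧ 0 ≤ n.2 ∧ wall n.1 n.2 fav = false ∧ n ∉ seen
    · rw [show solveAltPush fav (seen, []) n = (PySem.Set.add seen n, [n]) from by
          simp [solveAltPush, hc]]
      have hadd : PySem.Set.add seen n = seen ++ [n] := PySem.Set.add_of_not_mem hc.2.2.2
      rw [pushfold_shift fav ns (PySem.Set.add seen n) [n], ih (PySem.Set.add seen n), hadd]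
      simp
    · rw [show solveAltPush fav (seen, []) n = (seen, []) from by simp [solveAltPush, hc]]
      exact ih seen

theorem expand_shift (fav : Int) (F : List (Int × Int)) :
    ∀ (seen : PySem.Set (Int × Int)) (nf : List (Int × Int)),
    F.foldl (solveAltExpand fav) (seen, nf)
      = ((F.foldl (solveAltExpand fav) (seen, [])).1,
         nf ++ (F.foldl (solveAltExpand fav) (seen, [])).2) := by
  induction F with
  | nil => intro seen nf; simp
  | cons p F ih =>
    intro seen nf
    simp only [List.foldl_cons]
    have h1 : solveAltExpand fav (seen, nf) p
        = ((solveAltExpand fav (seen, []) p).1, nf ++ (solveAltExpand fav (seen, []) p).2) := by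
      unfold solveAltExpand
      exact pushfold_shift fav _ seen nf
    rcases hE : solveAltExpand fav (seen, []) p with ⟨s1, n1⟩
    rw [hE] at h1
    rw [h1]
    show List.foldl (solveAltExpand fav) (s1, nf ++ n1) F
      = ((List.foldl (solveAltExpand fav) (s1, n1) F).1,
         nf ++ (List.foldl (solveAltExpand fav) (s1, n1) F).2)
    rw [ih s1 (nf ++ n1), ih s1 n1]
    simp

theorem levelfold_seen_append (fav : Int) (F : List (Int × Int)) :
    ∀ (seen : PySem.Set (Int × Int)),
    (F.foldl (solveAltExpand fav) (seen, [])).1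
      = seen ++ (F.foldl (solveAltExpand fav) (seen, [])).2 := by
  induction F with
  | nil => intro seen; simp
  | cons p F ih =>
    intro seen
    simp only [List.foldl_cons]
    have he1 : (solveAltExpand fav (seen, []) p).1
        = seen ++ (solveAltExpand fav (seen, []) p).2 := by
      unfold solveAltExpand
      exact pushfold_seen_append fav _ seen
    rcases hE : solveAltExpand fav (seen, []) p with ⟨s1, n1⟩
    rw [hE] at he1
    simp only [] at he1
    rw [expand_shift fav F s1 n1]
    simp only [he1]
    show (List.foldl (solveAltExpand fav) (seen ++ n1, []) F).1
        = seen ++ (n1 ++ (List.foldl (solveAltExpand fav) (seen ++ n1, []) F).2)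
    rw [ih (seen ++ n1)]
    simp

-- grid52 is the rectangle [0,51]² …
theorem mem_grid52 (p : Int × Int) : p ∈ grid52 ↔ Bnd 51 p := by
  unfold grid52 Bnd
  simp only [List.mem_flatMap, List.mem_map, PySem.List.mem_pyRange_one]
  constructor
  · rintro ⟨x, hx, y, hy, rfl⟩; omega
  · rintro ⟨h1, h2, h3, h4⟩; exact ⟨p.1, by omega, p.2, by omega, rfl⟩

-- … listed without duplicates
theorem nodup_grid52 : grid52.Nodup := by
  have h := List.Nodup.product (PySem.List.nodup_pyRange_one 0 52)
    (PySem.List.nodup_pyRange_one 0 52)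
  simpa [List.product, grid52] using h

-- membership in one pull sweep
theorem mem_reachRound (fav : Int) (R : PySem.Set (Int × Int)) (p : Int × Int) :
    p ∈ reachRound fav R ↔
      Bnd 51 p ∧ (p ∈ R ∨ (wall p.1 p.2 fav = false ∧
        ((p.1 + 1, p.2) ∈ R ∨ (p.1 - 1, p.2) ∈ R ∨ (p.1, p.2 + 1) ∈ R ∨ (p.1, p.2 - 1) ∈ R))) := by
  unfold reachRound
  rw [List.mem_filter]
  simp [mem_grid52, or_comm]
  tauto

theorem nodup_reachRound (fav : Int) (R : PySem.Set (Int × Int)) : (reachRound fav R).Nodup :=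
  nodup_grid52.filter _

-- two nodup lists with the same members have the same length
theorem length_eq_of_mem_iff {α : Type} [DecidableEq α] {l1 l2 : List α}
    (h1 : l1.Nodup) (h2 : l2.Nodup) (h : ∀ p, p ∈ l1 ↔ p ∈ l2) : l1.length = l2.length := by
  rw [← List.toFinset_card_of_nodup h1, ← List.toFinset_card_of_nodup h2]
  congr 1
  ext a
  simp [h a]

-- the two iterations, side by side
def iterA (fav : Int) (j : Nat) : PySem.Set (Int × Int) × List (Int × Int) :=
  (solveAltRound fav)^[j] (PySem.Set.ofList [(1, 1)], [(1, 1)])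

def iterB (fav : Int) (j : Nat) : PySem.Set (Int × Int) :=
  (reachRound fav)^[j] (PySem.Set.ofList [(1, 1)])

-- round-by-round correspondence: after j ≤ 50 rounds the level model's seen set and the pull
-- sweep's reach set have the same members; plus the invariants that drive the induction
theorem sync (fav : Int) : ∀ (j : Nat), j ≤ 50 →
    (∀ p, p ∈ (iterA fav j).1 ↔ p ∈ iterB fav j) ∧
    (iterA fav j).1.Nodup ∧
    (iterB fav j).Nodup ∧
    (∀ p ∈ (iterA fav j).2, p ∈ (iterA fav j).1) ∧
    (∀ p ∈ (iterA fav j).1, Bnd (1 + (j : Int)) p) ∧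
    (∀ p q, q ∈ (iterA fav j).1 → q ∉ (iterA fav j).2 → adj q p → good fav p →
      p ∈ (iterA fav j).1) := by
  intro j
  induction j with
  | zero =>
    intro _
    have hA : iterA fav 0 = ([(1, 1)], [(1, 1)]) := rfl
    have hB : iterB fav 0 = [(1, 1)] := rfl
    rw [hA, hB]
    refine ⟨fun p => Iff.rfl, by simp, by simp, fun p hp => hp, ?_, ?_⟩
    · intro p hp
      simp only [List.mem_singleton] at hp
      subst hp
      exact ⟨by norm_num, by norm_num, by norm_num, by norm_num⟩
    · intro p q hq hnq _ _
      exact absurd hq hnq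
  | succ j ih =>
    intro hj
    obtain ⟨c1, c2, c3, c4, c5, c7⟩ := ih (by omega)
    set S := (iterA fav j).1 with hS
    set F := (iterA fav j).2 with hF
    set R := iterB fav j with hR
    set r := F.foldl (solveAltExpand fav) (S, ([] : List (Int × Int))) with hr
    have hAstep : iterA fav (j + 1) = r := by
      unfold iterA
      rw [Function.iterate_succ_apply']
      show solveAltRound fav (iterA fav j) = r
      unfold solveAltRound
      rw [hr, hS, hF]
    have hBstep : iterB fav (j + 1) = reachRound fav R := by
      unfold iterB
      rw [Function.iterate_succ_apply']
      rfl
    obtain ⟨hlen, hndf, hm2, hm1⟩ := levelfold_props fav F (S, [])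
    have happ : r.1 = S ++ r.2 := levelfold_seen_append fav F S
    have hmono : ∀ q ∈ S, q ∈ r.1 := by
      intro q hq; rw [happ]; exact List.mem_append.mpr (Or.inl hq)
    have hcomp : ∀ q p : Int × Int, q ∈ F → adj q p → good fav p → p ∈ r.1 := by
      intro q p hq ha hg
      exact expand_complete fav F (S, []) q p hq ha hg
    have hFbnd : ∀ p ∈ F, Bnd (1 + (j : Int)) p := fun p hp => c5 p (c4 p hp)
    have hbnd' : ∀ p ∈ r.1, Bnd (1 + ((j : Int) + 1)) p := by
      intro p hp
      rw [happ] at hp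
      rcases List.mem_append.mp hp with h | h
      · exact bnd_mono (by omega) (c5 p h)
      · rcases hm2 p h with h' | ⟨q, hqF, ha, hg⟩
        · simp at h'
        · have := nbr_bnd (hFbnd q hqF) ha hg.1 hg.2.1
          exact bnd_mono (by omega) this
    -- the key set equality of the new round
    have hiff : ∀ p, p ∈ r.1 ↔ p ∈ reachRound fav R := by
      intro p
      constructor
      · intro hp
        rw [mem_reachRound]
        rw [happ] at hp
        rcases List.mem_append.mp hp with h | h
        · refine ⟨bnd_mono (by omega) (c5 p h), Or.inl ((c1 p).mp h)⟩
        · rcases hm2 p h with h' | ⟨q, hqF, ha, hg⟩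
          · simp at h'
          · have hbq : Bnd 51 p := by
              have := nbr_bnd (hFbnd q hqF) ha hg.1 hg.2.1
              exact bnd_mono (by omega) this
            have hqR : q ∈ R := (c1 q).mp (c4 q hqF)
            refine ⟨hbq, Or.inr ⟨hg.2.2, ?_⟩⟩
            rcases adj_symm ha with h4 | h4 | h4 | h4 <;> rw [← h4]
            · exact Or.inl hqR
            · exact Or.inr (Or.inl hqR)
            · exact Or.inr (Or.inr (Or.inl hqR))
            · exact Or.inr (Or.inr (Or.inr hqR))
      · intro hp
        rw [mem_reachRound] at hp
        obtain ⟨hb, hc⟩ := hp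
        rcases hc with h | ⟨hw, hnb⟩
        · exact hmono p ((c1 p).mpr h)
        · have hg : good fav p := ⟨hb.1, hb.2.1, hw⟩
          have key : ∀ q : Int × Int, q ∈ R → adj p q → p ∈ r.1 := by
            intro q hqR hap
            have hqS : q ∈ S := (c1 q).mpr hqR
            by_cases hqF : q ∈ F
            · exact hcomp q p hqF (adj_symm hap) hg
            · exact hmono p (c7 p q hqS hqF (adj_symm hap) hg)
          rcases hnb with h | h | h | h
          · exact key _ h (Or.inl rfl)
          · exact key _ h (Or.inr (Or.inl rfl))
          · exact key _ h (Or.inr (Or.inr (Or.inl rfl)))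
          · exact key _ h (Or.inr (Or.inr (Or.inr rfl)))
    refine ⟨?_, ?_, ?_, ?_, ?_, ?_⟩
    · intro p; rw [hAstep, hBstep]; exact hiff p
    · rw [hAstep]; exact hndf c2
    · rw [hBstep]; exact nodup_reachRound fav R
    · intro p hp
      rw [hAstep] at hp ⊢
      rw [happ]
      exact List.mem_append.mpr (Or.inr hp)
    · intro p hp
      rw [hAstep] at hp
      have := hbnd' p hp
      exact bnd_mono (by push_cast; omega) this
    · intro p q hq hnq ha hg
      rw [hAstep] at hq hnq ⊢
      rw [happ] at hq
      rcases List.mem_append.mp hq with h | h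
      · by_cases hqF : q ∈ F
        · exact hcomp q p hqF ha hg
        · exact hmono p (c7 p q h hqF ha hg)
      · exact absurd h hnq

-- ===== VERDICT (by name: the statement is the Claim_ definition above) =====
theorem solve_spec : Claim_equal_solve := by
  intro s _ hpre
  unfold Spec_solve solve solve_alt
  unfold Pre_solve at hpre
  cases h : PySem.Int.ofStr? (PySem.Str.strip s) with
  | none => exact absurd hpre (by simp [h])
  | some fav =>
    show solveLoop fav 2705 [(1, 1, 0)] (PySem.Set.ofList [(1, 1)])
      = (((List.range 50).foldl (fun R _ => reachRound fav R)
          (PySem.Set.ofList [(1, 1)])).length : Int)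
    rw [show ([((1 : Int), (1 : Int), (0 : Int))] : List (Int × Int × Int))
        = [((1 : Int), (1 : Int))].map (tag ((50 : Int) - ((50 : Nat) : Int))) from by decide]
    rw [show (2705 : Nat) = [((1 : Int), (1 : Int))].length
        + ((2704 - (PySem.Set.ofList [((1 : Int), (1 : Int))]).length) + 1 + 0) from by decide]
    rw [foldl_const_iterate (reachRound fav) (List.range 50), List.length_range]
    rw [rounds fav 50 (by norm_num) [(1, 1)] (PySem.Set.ofList [(1, 1)]) 0
      (by decide)
      (by intro p hp; simp at hp; subst hp; unfold Bnd; norm_num)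
      (by intro p hp; simp at hp; subst hp; unfold Bnd; norm_num)]
    obtain ⟨h1, h2, h3, -, -, -⟩ := sync fav 50 (by norm_num)
    exact congrArg Int.ofNat (length_eq_of_mem_iff h2 h3 h1)
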